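-- pv_equiv track=rewrite | github.com/dmatrix/mlflow-misc | genai/agents/insect_expert_streamlit.py | format_judge_analysis
-- ===== SOURCE A (Python) =====
-- def format_judge_analysis(rationale: str) -> str:
--     """
--     Format judge's analysis by making criterion labels bold.
--
--     Args:
--         rationale: Raw rationale text from judge
--
--     Returns:
--         Formatted rationale with bold labels
--     """
--     # List of criterion labels to make bold
--     criteria = [
--         "Insect-specific relevance:",
--         "Scientific accuracy and proper terminology:",
--         "Clarity and engagement:",
--         "Appropriate length:",
--     ]
--
--     # Replace each criterion label with bold version
--     formatted = rationale
--     for criterion in criteria: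
--         formatted = formatted.replace(criterion, f"**{criterion}**")
--
--     return formatted
-- ===== SOURCE B (Python) =====
-- def format_judge_analysis(rationale: str) -> str:
--     """
--     Format judge's analysis by making criterion labels bold.
--
--     Single left-to-right scan: at each position emit the bold-wrapped label
--     if a criterion label starts there, otherwise copy the character.
--     """
--     c1 = "Insect-specific relevance:"
--     c2 = "Scientific accuracy and proper terminology:"
--     c3 = "Clarity and engagement:"
--     c4 = "Appropriate length:"
--     out = []
--     i = 0
--     n = len(rationale)
--     while i < n:
--         if rationale.startswith(c1, i):
--             out.append(f"**{c1}**")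
--             i += len(c1)
--         elif rationale.startswith(c2, i):
--             out.append(f"**{c2}**")
--             i += len(c2)
--         elif rationale.startswith(c3, i):
--             out.append(f"**{c3}**")
--             i += len(c3)
--         elif rationale.startswith(c4, i):
--             out.append(f"**{c4}**")
--             i += len(c4)
--         else:
--             out.append(rationale[i])
--             i += 1
--     return "".join(out)
-- ===== Notes on version B (the rewrite author's own statement) =====
-- stated objective: alternative
-- what changed: Replaces A's four sequential full-text str.replace passes (each rebuilding the whole string) with one left-to-right scan that checks all four criterion labels at the current position, emits the bold-wrapped label or the character, and never revisits output.
import Mathlib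
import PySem

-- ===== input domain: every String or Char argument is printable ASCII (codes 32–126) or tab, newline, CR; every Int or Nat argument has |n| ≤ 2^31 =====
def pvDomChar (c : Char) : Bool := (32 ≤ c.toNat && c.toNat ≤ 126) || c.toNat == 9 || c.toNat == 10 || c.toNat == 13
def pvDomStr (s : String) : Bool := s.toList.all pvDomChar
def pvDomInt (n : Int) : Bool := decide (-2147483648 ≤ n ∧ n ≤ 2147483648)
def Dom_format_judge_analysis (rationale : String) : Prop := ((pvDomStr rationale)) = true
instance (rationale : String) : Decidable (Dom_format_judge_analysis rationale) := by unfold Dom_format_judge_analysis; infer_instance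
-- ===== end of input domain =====

-- B replaces A's four sequential full-text str.replace passes with one left-to-right
-- scan that checks the four criterion labels at each position (alternative, same output).


-- ===== PORT A =====
-- A: formatted = rationale; for criterion in criteria: formatted = formatted.replace(criterion, "**" + criterion + "**")
def format_judge_analysis (rationale : String) : String :=
  let criteria : List String :=
    ["Insect-specific relevance:",
     "Scientific accuracy and proper terminology:",
     "Clarity and engagement:",
     "Appropriate length:"]
  criteria.foldl
    (fun formatted criterion =>
      PySem.Str.replace formatted criterion ("**" ++ criterion ++ "**")) rationale

-- ===== PORT B =====
-- the four criterion labels, as character lists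
def pvL1 : List Char := "Insect-specific relevance:".toList
def pvL2 : List Char := "Scientific accuracy and proper terminology:".toList
def pvL3 : List Char := "Clarity and engagement:".toList
def pvL4 : List Char := "Appropriate length:".toList

-- f"**{label}**"
def pvBold (l : List Char) : List Char := '*' :: '*' :: (l ++ ['*', '*'])

-- B's while-loop: at each position, the first matching label (if any) is emitted
-- bold and skipped, otherwise the character is copied.
def pvScan : List Char → List Char
  | [] => []
  | c :: t =>
    if pvL1.isPrefixOf (c :: t) then pvBold pvL1 ++ pvScan ((c :: t).drop pvL1.length)
    else if pvL2.isPrefixOf (c :: t) then pvBold pvL2 ++ pvScan ((c :: t).drop pvL2.length)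
    else if pvL3.isPrefixOf (c :: t) then pvBold pvL3 ++ pvScan ((c :: t).drop pvL3.length)
    else if pvL4.isPrefixOf (c :: t) then pvBold pvL4 ++ pvScan ((c :: t).drop pvL4.length)
    else c :: pvScan t
  termination_by l => l.length
  decreasing_by
    all_goals
      (have h1 : 0 < pvL1.length := by decide
       have h2 : 0 < pvL2.length := by decide
       have h3 : 0 < pvL3.length := by decide
       have h4 : 0 < pvL4.length := by decide
       simp only [List.length_drop, List.length_cons]; omega)

def format_judge_analysis_alt (rationale : String) : String :=
  String.ofList (pvScan rationale.toList)

-- ===== PRECONDITION & SPEC =====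
def Spec_format_judge_analysis (rationale : String) (out : String) : Prop := out = format_judge_analysis_alt rationale
instance (rationale : String) (out : String) : Decidable (Spec_format_judge_analysis rationale out) := by unfold Spec_format_judge_analysis; infer_instance

-- ===== CLAIM (what is proved, stated in full; the proofs are below) =====
def Claim_equal_format_judge_analysis : Prop := ∀ (rationale : String), Dom_format_judge_analysis rationale → Spec_format_judge_analysis rationale (format_judge_analysis rationale)

-- ===== LEMMAS AND PROOFS =====

-- canonical (fueled) form of one replace pass
def pvRepGo (old new : List Char) : Nat → List Char → List Char
  | _, [] => []
  | 0, _ :: _ => []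
  | fuel+1, c :: t =>
    if old.isPrefixOf (c :: t) then new ++ pvRepGo old new fuel ((c :: t).drop old.length)
    else c :: pvRepGo old new fuel t

def pvRep (old new : List Char) (l : List Char) : List Char := pvRepGo old new l.length l

-- multi-pattern scanner: the first pattern of ps matching at the head wins
def pvFind : List (List Char × List Char) → List Char → Option (List Char × List Char)
  | [], _ => none
  | (q, b) :: rest, s => if q.isPrefixOf s && !q.isEmpty then some (q, b) else pvFind rest s

def pvScanPGo (ps : List (List Char × List Char)) : Nat → List Char → List Char
  | _, [] => []
  | 0, _ :: _ => []
  | fuel+1, c :: t =>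
    match pvFind ps (c :: t) with
    | some (q, b) => b ++ pvScanPGo ps fuel ((c :: t).drop q.length)
    | none => c :: pvScanPGo ps fuel t

def pvScanP (ps : List (List Char × List Char)) (l : List Char) : List Char :=
  pvScanPGo ps l.length l

-- pat never matches starting inside block (whatever follows block)
def pvNoHit (pat block : List Char) : Prop :=
  ∀ p < block.length, ¬ pat <+: block.drop p ∧ ¬ block.drop p <+: pat

def pvPairs : List (List Char × List Char) :=
  [(pvL1, pvBold pvL1), (pvL2, pvBold pvL2), (pvL3, pvBold pvL3), (pvL4, pvBold pvL4)]

theorem pvRepGo_fuel (old new : List Char) (hold : old ≠ []) :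
    ∀ (fuel fuel' : Nat) (l : List Char), l.length ≤ fuel → l.length ≤ fuel' →
      pvRepGo old new fuel l = pvRepGo old new fuel' l := by
  intro fuel
  induction fuel with
  | zero =>
    intro fuel' l h h'
    cases l with
    | nil => cases fuel' <;> rfl
    | cons c t => simp at h
  | succ n ih =>
    intro fuel' l h h'
    cases l with
    | nil => cases fuel' <;> rfl
    | cons c t =>
      cases fuel' with
      | zero => simp at h'
      | succ m =>
        have hol : 0 < old.length := List.length_pos_iff.mpr hold
        simp only [pvRepGo]
        by_cases hp : old.isPrefixOf (c :: t) = true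
        · rw [if_pos hp, if_pos hp,
            ih m ((c :: t).drop old.length)
              (by simp only [List.length_drop, List.length_cons] at *; omega)
              (by simp only [List.length_drop, List.length_cons] at *; omega)]
        · rw [if_neg (by simp [hp]), if_neg (by simp [hp]),
            ih m t (by simp only [List.length_cons] at h; omega)
              (by simp only [List.length_cons] at h'; omega)]

theorem pv_go_eq (old new : List Char) (hold : old ≠ []) :
    ∀ (fuel : Nat) (l acc : List Char), l.length ≤ fuel →
      PySem.Chars.replace.go old new fuel l acc = acc.reverse ++ pvRepGo old new fuel l := by
  intro fuel
  induction fuel with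
  | zero =>
    intro l acc h
    have : l = [] := List.eq_nil_of_length_eq_zero (Nat.le_zero.mp h)
    subst this
    simp [PySem.Chars.replace.go, pvRepGo]
  | succ n ih =>
    intro l acc h
    cases l with
    | nil => simp [PySem.Chars.replace.go, pvRepGo]
    | cons c t =>
      have hol : 0 < old.length := List.length_pos_iff.mpr hold
      simp only [PySem.Chars.replace.go, pvRepGo]
      by_cases hp : old.isPrefixOf (c :: t) = true
      · rw [if_pos hp, if_pos hp,
          ih ((c :: t).drop old.length) (new.reverse ++ acc)
            (by simp only [List.length_drop, List.length_cons] at *; omega)]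
        simp
      · rw [if_neg (by simp [hp]), if_neg (by simp [hp]),
          ih t (c :: acc) (by simp only [List.length_cons] at h; omega)]
        simp

theorem pv_replace_eq (old new : List Char) (hold : old ≠ []) (s : List Char) :
    PySem.Chars.replace s old new = pvRep old new s := by
  unfold PySem.Chars.replace pvRep
  rw [if_neg (by simp [List.isEmpty_iff, hold])]
  simpa using pv_go_eq old new hold s.length s [] le_rfl

theorem pvRep_cons_pos (old new : List Char) (hold : old ≠ []) (c : Char) (t : List Char)
    (hp : old.isPrefixOf (c :: t) = true) :
    pvRep old new (c :: t) = new ++ pvRep old new ((c :: t).drop old.length) := by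
  have hol : 0 < old.length := List.length_pos_iff.mpr hold
  unfold pvRep
  simp only [List.length_cons, pvRepGo]
  rw [if_pos hp]
  congr 1
  exact pvRepGo_fuel old new hold t.length ((c :: t).drop old.length).length _
    (by simp only [List.length_drop, List.length_cons]; omega) le_rfl

theorem pvRep_cons_neg (old new : List Char) (c : Char) (t : List Char)
    (hp : old.isPrefixOf (c :: t) = false) :
    pvRep old new (c :: t) = c :: pvRep old new t := by
  unfold pvRep
  simp only [List.length_cons, pvRepGo]
  rw [if_neg (by simp [hp])]

theorem pvFind_pos : ∀ (ps : List (List Char × List Char)) (s : List Char) (q b : List Char),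
    pvFind ps s = some (q, b) → q.isPrefixOf s = true ∧ 0 < q.length := by
  intro ps
  induction ps with
  | nil => intro s q b h; simp [pvFind] at h
  | cons qb rest ih =>
    intro s q b h
    obtain ⟨q', b'⟩ := qb
    simp only [pvFind] at h
    by_cases hc : (q'.isPrefixOf s && !q'.isEmpty) = true
    · rw [if_pos hc] at h
      simp only [Option.some.injEq, Prod.mk.injEq] at h
      obtain ⟨rfl, rfl⟩ := h
      simp only [Bool.and_eq_true, Bool.not_eq_true'] at hc
      refine ⟨hc.1, ?_⟩
      exact List.length_pos_iff.mpr (by simpa [List.isEmpty_iff] using hc.2)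
    · rw [if_neg hc] at h
      exact ih s q b h

theorem pvFind_mem : ∀ (ps : List (List Char × List Char)) (s : List Char) (q b : List Char),
    pvFind ps s = some (q, b) → (q, b) ∈ ps := by
  intro ps
  induction ps with
  | nil => intro s q b h; simp [pvFind] at h
  | cons qb rest ih =>
    intro s q b h
    obtain ⟨q', b'⟩ := qb
    simp only [pvFind] at h
    by_cases hc : (q'.isPrefixOf s && !q'.isEmpty) = true
    · rw [if_pos hc] at h
      simp only [Option.some.injEq, Prod.mk.injEq] at h
      obtain ⟨rfl, rfl⟩ := h
      exact List.mem_cons_self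
    · rw [if_neg hc] at h
      exact List.mem_cons_of_mem _ (ih s q b h)

theorem pvFind_append_some (ps l : List (List Char × List Char)) (s : List Char)
    (x : List Char × List Char) (h : pvFind ps s = some x) : pvFind (ps ++ l) s = some x := by
  induction ps with
  | nil => simp [pvFind] at h
  | cons qb rest ih =>
    obtain ⟨q', b'⟩ := qb
    simp only [pvFind, List.cons_append] at h ⊢
    by_cases hc : (q'.isPrefixOf s && !q'.isEmpty) = true
    · rw [if_pos hc] at h ⊢; exact h
    · rw [if_neg hc] at h ⊢; exact ih h

theorem pvFind_append_none (ps l : List (List Char × List Char)) (s : List Char)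
    (h : pvFind ps s = none) : pvFind (ps ++ l) s = pvFind l s := by
  induction ps with
  | nil => rfl
  | cons qb rest ih =>
    obtain ⟨q', b'⟩ := qb
    simp only [pvFind, List.cons_append] at h ⊢
    by_cases hc : (q'.isPrefixOf s && !q'.isEmpty) = true
    · rw [if_pos hc] at h; simp at h
    · rw [if_neg hc] at h ⊢; exact ih h

theorem pvFind_none_of (ps : List (List Char × List Char)) (s : List Char)
    (h : ∀ qb ∈ ps, ¬ qb.1 <+: s) : pvFind ps s = none := by
  induction ps with
  | nil => rfl
  | cons qb rest ih =>
    obtain ⟨q', b'⟩ := qb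
    simp only [pvFind]
    rw [if_neg, ih (fun x hx => h x (List.mem_cons_of_mem _ hx))]
    have hq : ¬ q' <+: s := h (q', b') List.mem_cons_self
    simp only [Bool.and_eq_true, not_and]
    intro hpre
    exact absurd (List.isPrefixOf_iff_prefix.mp hpre) hq

theorem pvScanPGo_fuel (ps : List (List Char × List Char)) :
    ∀ (fuel fuel' : Nat) (l : List Char), l.length ≤ fuel → l.length ≤ fuel' →
      pvScanPGo ps fuel l = pvScanPGo ps fuel' l := by
  intro fuel
  induction fuel with
  | zero =>
    intro fuel' l h h'
    cases l with
    | nil => cases fuel' <;> rfl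
    | cons c t => simp at h
  | succ n ih =>
    intro fuel' l h h'
    cases l with
    | nil => cases fuel' <;> rfl
    | cons c t =>
      cases fuel' with
      | zero => simp at h'
      | succ m =>
        cases hf : pvFind ps (c :: t) with
        | none =>
          simp only [pvScanPGo, hf]
          rw [ih m t (by simp only [List.length_cons] at h; omega)
            (by simp only [List.length_cons] at h'; omega)]
        | some qb =>
          obtain ⟨q, b⟩ := qb
          have hq := (pvFind_pos ps (c :: t) q b hf).2
          simp only [pvScanPGo, hf]
          rw [ih m ((c :: t).drop q.length)
            (by simp only [List.length_drop, List.length_cons] at *; omega)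
            (by simp only [List.length_drop, List.length_cons] at *; omega)]

theorem pvScanP_cons_some (ps : List (List Char × List Char)) (c : Char) (t : List Char)
    (q b : List Char) (h : pvFind ps (c :: t) = some (q, b)) :
    pvScanP ps (c :: t) = b ++ pvScanP ps ((c :: t).drop q.length) := by
  have hq := (pvFind_pos ps (c :: t) q b h).2
  unfold pvScanP
  simp only [List.length_cons, pvScanPGo, h]
  congr 1
  exact pvScanPGo_fuel ps t.length ((c :: t).drop q.length).length _
    (by simp only [List.length_drop, List.length_cons]; omega) le_rfl

theorem pvScanP_cons_none (ps : List (List Char × List Char)) (c : Char) (t : List Char)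
    (h : pvFind ps (c :: t) = none) :
    pvScanP ps (c :: t) = c :: pvScanP ps t := by
  unfold pvScanP
  simp only [List.length_cons, pvScanPGo, h]

theorem pvScanP_nil_ps : ∀ s : List Char, pvScanP [] s = s := by
  intro s
  induction s with
  | nil => rfl
  | cons c t ih =>
    rw [pvScanP_cons_none [] c t rfl, ih]

-- pvNoHit gives the ∀-continuation form
theorem pvNoHit_spec (pat block : List Char) (h : pvNoHit pat block) :
    ∀ p < block.length, ∀ u : List Char, ¬ pat <+: (block.drop p ++ u) := by
  intro p hp u hpre
  rcases List.prefix_or_prefix_of_prefix hpre (List.prefix_append _ _) with h3 | h3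
  · exact (h p hp).1 h3
  · exact (h p hp).2 h3

theorem pvRep_prepend (old new block : List Char)
    (hb : ∀ p < block.length, ∀ u : List Char, ¬ old <+: (block.drop p ++ u)) :
    ∀ x, pvRep old new (block ++ x) = block ++ pvRep old new x := by
  induction block with
  | nil => intro x; simp
  | cons b0 bt ih =>
    intro x
    have hb0 : old.isPrefixOf (b0 :: (bt ++ x)) = false := by
      rw [Bool.eq_false_iff, Ne, List.isPrefixOf_iff_prefix]
      exact hb 0 (by simp) x
    rw [List.cons_append, pvRep_cons_neg old new b0 (bt ++ x) hb0,
      ih (fun p hp u => by simpa using hb (p + 1) (by simp; omega) u) x]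
    simp

theorem pvScanP_prepend (ps : List (List Char × List Char)) (block : List Char)
    (hb : ∀ qb ∈ ps, ∀ p < block.length, ∀ u : List Char, ¬ qb.1 <+: (block.drop p ++ u)) :
    ∀ x, pvScanP ps (block ++ x) = block ++ pvScanP ps x := by
  induction block with
  | nil => intro x; simp
  | cons b0 bt ih =>
    intro x
    have hf : pvFind ps (b0 :: (bt ++ x)) = none := by
      apply pvFind_none_of
      intro qb hm
      exact hb qb hm 0 (by simp) x
    rw [List.cons_append, pvScanP_cons_none ps b0 (bt ++ x) hf,
      ih (fun qb hm p hp u => by simpa using hb qb hm (p + 1) (by simp; omega) u) x]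
    simp

-- replacements starting with '*' never create a new match of a '*'-free pattern
theorem pvNoCreate (ps : List (List Char × List Char))
    (hB : ∀ qb ∈ ps, ∃ bt : List Char, qb.2 = '*' :: bt) :
    ∀ (t r : List Char), r ≠ [] → '*' ∉ r → r <+: pvScanP ps t → r <+: t := by
  intro t
  induction t with
  | nil =>
    intro r hr _ hpre
    simp only [pvScanP, pvScanPGo] at hpre
    exact absurd (List.prefix_nil.mp hpre) hr
  | cons c t ih =>
    intro r hr hstar hpre
    cases hf : pvFind ps (c :: t) with
    | some qb =>
      obtain ⟨q, b⟩ := qb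
      rw [pvScanP_cons_some ps c t q b hf] at hpre
      obtain ⟨bt, hbt⟩ := hB (q, b) (pvFind_mem ps (c :: t) q b hf)
      cases r with
      | nil => exact absurd rfl hr
      | cons r0 rr =>
        have hbt' : b = '*' :: bt := hbt
        rw [hbt', List.cons_append, List.cons_prefix_cons] at hpre
        exact absurd (hpre.1 ▸ List.mem_cons_self) hstar
    | none =>
      rw [pvScanP_cons_none ps c t hf] at hpre
      cases r with
      | nil => exact absurd rfl hr
      | cons r0 rr =>
        rw [List.cons_prefix_cons] at hpre
        obtain ⟨rfl, hrr⟩ := hpre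
        cases rr with
        | nil => exact List.cons_prefix_cons.mpr ⟨rfl, List.nil_prefix⟩
        | cons r1 rs =>
          exact List.cons_prefix_cons.mpr ⟨rfl,
            ih (r1 :: rs) (by simp) (fun hm => hstar (List.mem_cons_of_mem _ hm)) hrr⟩

theorem pvRep_append_self (pat new : List Char) (hpat : pat ≠ []) (w : List Char) :
    pvRep pat new (pat ++ w) = new ++ pvRep pat new w := by
  cases pat with
  | nil => exact absurd rfl hpat
  | cons p0 pt =>
    have hp : (p0 :: pt).isPrefixOf ((p0 :: pt) ++ w) = true :=
      List.isPrefixOf_iff_prefix.mpr (List.prefix_append _ _)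
    rw [List.cons_append] at hp
    rw [List.cons_append, pvRep_cons_pos (p0 :: pt) new hpat p0 (pt ++ w) hp]
    congr 1
    rw [show p0 :: (pt ++ w) = (p0 :: pt) ++ w from rfl, List.drop_left]

-- one replace pass after the scanner = the scanner with the pattern appended
theorem pvStep (ps : List (List Char × List Char)) (pat new : List Char)
    (hpat : pat ≠ []) (hstar : '*' ∉ pat)
    (hB : ∀ qb ∈ ps, ∃ bt : List Char, qb.2 = '*' :: bt)
    (hNB : ∀ qb ∈ ps, pvNoHit pat qb.2)
    (hQP : ∀ qb ∈ ps, pvNoHit qb.1 pat) :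
    ∀ s, pvRep pat new (pvScanP ps s) = pvScanP (ps ++ [(pat, new)]) s := by
  suffices H : ∀ (n : Nat) (s : List Char), s.length ≤ n →
      pvRep pat new (pvScanP ps s) = pvScanP (ps ++ [(pat, new)]) s by
    intro s; exact H s.length s le_rfl
  intro n
  induction n with
  | zero =>
    intro s h
    have : s = [] := List.eq_nil_of_length_eq_zero (Nat.le_zero.mp h)
    subst this
    rfl
  | succ n ih =>
    intro s h
    cases s with
    | nil => rfl
    | cons c t =>
      have hplen : 0 < pat.length := List.length_pos_iff.mpr hpat
      cases hf : pvFind ps (c :: t) with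
      | some qb =>
        obtain ⟨q, b⟩ := qb
        have hmem := pvFind_mem ps (c :: t) q b hf
        have hqpos := (pvFind_pos ps (c :: t) q b hf).2
        rw [pvScanP_cons_some ps c t q b hf,
          pvRep_prepend pat new b (pvNoHit_spec pat b (hNB (q, b) hmem)),
          ih ((c :: t).drop q.length)
            (by simp only [List.length_drop, List.length_cons] at *; omega),
          pvScanP_cons_some (ps ++ [(pat, new)]) c t q b
            (pvFind_append_some ps [(pat, new)] (c :: t) (q, b) hf)]
      | none =>
        by_cases hp : pat.isPrefixOf (c :: t) = true
        · obtain ⟨u, hu⟩ := List.isPrefixOf_iff_prefix.mp hp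
          have hlenu : u.length ≤ n := by
            have hlen := congrArg List.length hu
            simp only [List.length_append, List.length_cons] at hlen h
            omega
          have hf2 : pvFind (ps ++ [(pat, new)]) (pat ++ u) = some (pat, new) := by
            rw [pvFind_append_none ps [(pat, new)] (pat ++ u) (by rw [hu]; exact hf)]
            simp only [pvFind]
            rw [if_pos]
            simp only [Bool.and_eq_true, Bool.not_eq_true']
            exact ⟨List.isPrefixOf_iff_prefix.mpr (List.prefix_append _ _),
              by simpa [List.isEmpty_iff] using hpat⟩
          rw [← hu,
            pvScanP_prepend ps pat (fun qb hm => pvNoHit_spec qb.1 pat (hQP qb hm)) u,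
            pvRep_append_self pat new hpat, ih u hlenu]
          cases pat with
          | nil => exact absurd rfl hpat
          | cons p0 pt =>
            rw [List.cons_append] at hf2 ⊢
            rw [pvScanP_cons_some (ps ++ [(p0 :: pt, new)]) p0 (pt ++ u) (p0 :: pt) new hf2]
            congr 1
            rw [show p0 :: (pt ++ u) = (p0 :: pt) ++ u from rfl, List.drop_left]
        · have hcc : pat.isPrefixOf (c :: pvScanP ps t) = false := by
            rw [Bool.eq_false_iff, Ne, List.isPrefixOf_iff_prefix]
            intro hpre
            cases pat with
            | nil => exact absurd rfl hpat
            | cons p0 pt =>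
              rw [List.cons_prefix_cons] at hpre
              obtain ⟨rfl, hpt⟩ := hpre
              cases pt with
              | nil =>
                exact hp (List.isPrefixOf_iff_prefix.mpr
                  (List.cons_prefix_cons.mpr ⟨rfl, List.nil_prefix⟩))
              | cons p1 pr =>
                have hin := pvNoCreate ps hB t (p1 :: pr) (by simp)
                  (fun hm => hstar (List.mem_cons_of_mem _ hm)) hpt
                exact hp (List.isPrefixOf_iff_prefix.mpr
                  (List.cons_prefix_cons.mpr ⟨rfl, hin⟩))
          rw [pvScanP_cons_none ps c t hf, pvRep_cons_neg pat new c (pvScanP ps t) hcc,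
            ih t (by simp only [List.length_cons] at h; omega),
            pvScanP_cons_none (ps ++ [(pat, new)]) c t
              (by rw [pvFind_append_none ps [(pat, new)] (c :: t) hf]; simp [pvFind, hp])]

theorem pvScanP_pairs_eq_pvScan : ∀ s : List Char, pvScanP pvPairs s = pvScan s := by
  suffices H : ∀ (n : Nat) (s : List Char), s.length ≤ n → pvScanP pvPairs s = pvScan s by
    intro s; exact H s.length s le_rfl
  intro n
  induction n with
  | zero =>
    intro s h
    have : s = [] := List.eq_nil_of_length_eq_zero (Nat.le_zero.mp h)
    subst this
    simp [pvScanP, pvScanPGo, pvScan]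
  | succ n ih =>
    intro s h
    cases s with
    | nil => simp [pvScanP, pvScanPGo, pvScan]
    | cons c t =>
      have e1 : pvL1.isEmpty = false := by decide
      have e2 : pvL2.isEmpty = false := by decide
      have e3 : pvL3.isEmpty = false := by decide
      have e4 : pvL4.isEmpty = false := by decide
      have g1 : 0 < pvL1.length := by decide
      have g2 : 0 < pvL2.length := by decide
      have g3 : 0 < pvL3.length := by decide
      have g4 : 0 < pvL4.length := by decide
      by_cases h1 : pvL1.isPrefixOf (c :: t) = true
      · rw [pvScanP_cons_some pvPairs c t pvL1 (pvBold pvL1)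
            (by simp [pvPairs, pvFind, h1, e1]), pvScan, if_pos h1,
          ih _ (by simp only [List.length_drop, List.length_cons] at *; omega)]
      · by_cases h2 : pvL2.isPrefixOf (c :: t) = true
        · rw [pvScanP_cons_some pvPairs c t pvL2 (pvBold pvL2)
              (by simp [pvPairs, pvFind, h1, h2, e2]), pvScan, if_neg (by simp [h1]),
            if_pos h2, ih _ (by simp only [List.length_drop, List.length_cons] at *; omega)]
        · by_cases h3 : pvL3.isPrefixOf (c :: t) = true
          · rw [pvScanP_cons_some pvPairs c t pvL3 (pvBold pvL3)
                (by simp [pvPairs, pvFind, h1, h2, h3, e3]), pvScan,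
              if_neg (by simp [h1]), if_neg (by simp [h2]), if_pos h3,
              ih _ (by simp only [List.length_drop, List.length_cons] at *; omega)]
          · by_cases h4 : pvL4.isPrefixOf (c :: t) = true
            · rw [pvScanP_cons_some pvPairs c t pvL4 (pvBold pvL4)
                  (by simp [pvPairs, pvFind, h1, h2, h3, h4, e4]), pvScan,
                if_neg (by simp [h1]), if_neg (by simp [h2]), if_neg (by simp [h3]),
                if_pos h4,
                ih _ (by simp only [List.length_drop, List.length_cons] at *; omega)]
            · rw [pvScanP_cons_none pvPairs c t (by simp [pvPairs, pvFind, h1, h2, h3, h4]),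
                pvScan, if_neg (by simp [h1]), if_neg (by simp [h2]), if_neg (by simp [h3]),
                if_neg (by simp [h4]), ih t (by simp only [List.length_cons] at h; omega)]

theorem pv_chars_main (s : List Char) :
    PySem.Chars.replace
      (PySem.Chars.replace
        (PySem.Chars.replace
          (PySem.Chars.replace s pvL1 (pvBold pvL1)) pvL2 (pvBold pvL2)) pvL3 (pvBold pvL3))
      pvL4 (pvBold pvL4) = pvScan s := by
  rw [pv_replace_eq pvL1 (pvBold pvL1) (by decide) s,
    pv_replace_eq pvL2 (pvBold pvL2) (by decide) _,
    pv_replace_eq pvL3 (pvBold pvL3) (by decide) _,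
    pv_replace_eq pvL4 (pvBold pvL4) (by decide) _]
  have h1 : pvRep pvL1 (pvBold pvL1) s = pvScanP [(pvL1, pvBold pvL1)] s := by
    conv_lhs => rw [← pvScanP_nil_ps s]
    exact pvStep [] pvL1 (pvBold pvL1) (by decide) (by decide)
      (by simp) (by simp) (by simp) s
  have h2 : pvRep pvL2 (pvBold pvL2) (pvScanP [(pvL1, pvBold pvL1)] s)
      = pvScanP [(pvL1, pvBold pvL1), (pvL2, pvBold pvL2)] s := by
    exact pvStep [(pvL1, pvBold pvL1)] pvL2 (pvBold pvL2) (by decide) (by decide)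
      (by intro qb hm; simp only [List.mem_singleton] at hm; subst hm; exact ⟨_, rfl⟩)
      (by intro qb hm; simp only [List.mem_singleton] at hm; subst hm; unfold pvNoHit; decide)
      (by intro qb hm; simp only [List.mem_singleton] at hm; subst hm; unfold pvNoHit; decide) s
  have h3 : pvRep pvL3 (pvBold pvL3) (pvScanP [(pvL1, pvBold pvL1), (pvL2, pvBold pvL2)] s)
      = pvScanP [(pvL1, pvBold pvL1), (pvL2, pvBold pvL2), (pvL3, pvBold pvL3)] s := by
    exact pvStep [(pvL1, pvBold pvL1), (pvL2, pvBold pvL2)] pvL3 (pvBold pvL3)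
      (by decide) (by decide)
      (by intro qb hm; simp only [List.mem_cons, List.not_mem_nil, or_false] at hm
          rcases hm with hm | hm <;> subst hm <;> exact ⟨_, rfl⟩)
      (by intro qb hm; simp only [List.mem_cons, List.not_mem_nil, or_false] at hm
          rcases hm with hm | hm <;> subst hm <;> (unfold pvNoHit; decide))
      (by intro qb hm; simp only [List.mem_cons, List.not_mem_nil, or_false] at hm
          rcases hm with hm | hm <;> subst hm <;> (unfold pvNoHit; decide)) s
  have h4 : pvRep pvL4 (pvBold pvL4)
      (pvScanP [(pvL1, pvBold pvL1), (pvL2, pvBold pvL2), (pvL3, pvBold pvL3)] s)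
      = pvScanP pvPairs s := by
    exact pvStep [(pvL1, pvBold pvL1), (pvL2, pvBold pvL2), (pvL3, pvBold pvL3)]
      pvL4 (pvBold pvL4) (by decide) (by decide)
      (by intro qb hm; simp only [List.mem_cons, List.not_mem_nil, or_false] at hm
          rcases hm with hm | hm | hm <;> subst hm <;> exact ⟨_, rfl⟩)
      (by intro qb hm; simp only [List.mem_cons, List.not_mem_nil, or_false] at hm
          rcases hm with hm | hm | hm <;> subst hm <;> (unfold pvNoHit; decide))
      (by intro qb hm; simp only [List.mem_cons, List.not_mem_nil, or_false] at hm
          rcases hm with hm | hm | hm <;> subst hm <;> (unfold pvNoHit; decide)) s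
  rw [h1, h2, h3, h4, pvScanP_pairs_eq_pvScan s]

-- ===== VERDICT (by name: the statement is the Claim_ definition above) =====
theorem format_judge_analysis_spec : Claim_equal_format_judge_analysis := by
  intro r _
  unfold Spec_format_judge_analysis format_judge_analysis format_judge_analysis_alt
  simp only [List.foldl_cons, List.foldl_nil, PySem.Str.replace, String.toList_ofList]
  rw [show ("Insect-specific relevance:" : String).toList = pvL1 from rfl,
    show ("Scientific accuracy and proper terminology:" : String).toList = pvL2 from rfl,
    show ("Clarity and engagement:" : String).toList = pvL3 from rfl,
    show ("Appropriate length:" : String).toList = pvL4 from rfl,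
    show ("**" ++ ("Insect-specific relevance:" : String) ++ "**").toList = pvBold pvL1 from by decide,
    show ("**" ++ ("Scientific accuracy and proper terminology:" : String) ++ "**").toList = pvBold pvL2 from by decide,
    show ("**" ++ ("Clarity and engagement:" : String) ++ "**").toList = pvBold pvL3 from by decide,
    show ("**" ++ ("Appropriate length:" : String) ++ "**").toList = pvBold pvL4 from by decide]
  exact congrArg String.ofList (pv_chars_main r.toList)
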